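-- pv_equiv track=rewrite | github.com/diamondrajan1996/chatbot_deep | deeppavlov/dataset_readers/punctuation_dataset_reader.py | make_word_punct_sents
-- ===== SOURCE A (Python) =====
-- from string import punctuation as PUNCTUATION
--
-- NO_PUNCT = "NONE"
--
-- def make_word_punct_sents(sent, max_punct_in_row=3):
--     word_sent, word_indexes, punct_sent, last_punct = [], [], [], ""
--     for i, word in enumerate(sent):
--         if word in PUNCTUATION:
--             if last_punct == NO_PUNCT:
--                 last_punct = word
--             elif max_punct_in_row > 0 and len(last_punct) < 2 * max_punct_in_row-1:
--                 if last_punct.endswith(".") and all(x == "." for x in word):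
--                     last_punct += word
--                 else:
--                     last_punct += " " + word
--         else:
--             if len(word_sent) > 0:
--                 punct_sent.append(last_punct)
--             word_sent.append(word)
--             word_indexes.append(i)
--             last_punct = NO_PUNCT
--     punct_sent.append(last_punct)
--     return word_sent, punct_sent, word_indexes
-- ===== SOURCE B (Python) =====
-- from string import punctuation as PUNCTUATION
--
-- NO_PUNCT = "NONE"
--
-- def _fold_punct(init, toks, max_punct_in_row):
--     acc = init
--     for t in toks:
--         if acc == NO_PUNCT:
--             acc = t
--         elif max_punct_in_row > 0 and len(acc) < 2 * max_punct_in_row - 1: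
--             if acc.endswith(".") and all(x == "." for x in t):
--                 acc += t
--             else:
--                 acc += " " + t
--     return acc
--
-- def make_word_punct_sents(sent, max_punct_in_row=3):
--     # group tokens: punctuation before the first word goes to `leading`,
--     # every other punctuation token attaches to the most recent word
--     leading, groups = [], []
--     for i, word in enumerate(sent):
--         if word in PUNCTUATION:
--             (groups[-1][2] if groups else leading).append(word)
--         else:
--             groups.append((word, i, []))
--     if groups:
--         punct_sent = [_fold_punct(NO_PUNCT, p, max_punct_in_row) for _, _, p in groups]
--     else:
--         punct_sent = [_fold_punct("", leading, max_punct_in_row)]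
--     return [w for w, _, _ in groups], punct_sent, [i for _, i, _ in groups]
-- ===== Notes on version B (the rewrite author's own statement) =====
-- stated objective: alternative
-- what changed: Instead of threading a 4-tuple of mutable lists plus a last_punct accumulator through one loop, B first groups tokens into (word, index, trailing punctuation run) triples plus a leading run, then folds each run with the merge rule separately (leading run used only when there are no words).
import Mathlib
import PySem

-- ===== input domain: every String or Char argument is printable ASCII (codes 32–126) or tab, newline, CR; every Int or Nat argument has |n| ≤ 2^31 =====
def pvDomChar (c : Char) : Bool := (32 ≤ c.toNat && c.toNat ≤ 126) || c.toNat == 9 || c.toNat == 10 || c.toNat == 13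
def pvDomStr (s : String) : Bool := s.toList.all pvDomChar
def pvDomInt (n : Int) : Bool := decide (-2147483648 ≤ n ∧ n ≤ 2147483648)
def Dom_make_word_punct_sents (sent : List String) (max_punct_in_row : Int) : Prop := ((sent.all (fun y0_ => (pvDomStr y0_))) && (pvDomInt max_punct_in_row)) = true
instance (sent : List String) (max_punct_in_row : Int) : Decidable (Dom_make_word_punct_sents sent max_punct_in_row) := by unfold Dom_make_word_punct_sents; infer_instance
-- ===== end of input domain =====

-- B groups tokens in one pass into (word, index, trailing-punctuation-run) triples plus a leading run,
-- then folds each run with A's merge rule; objective: alternative decomposition (same cost), return value only.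


-- string.punctuation
def pvPUNCT : String := "!\"#$%&'()*+,-./:;<=>?@[\\]^_`{|}~"

-- ===== PORT A =====
-- the body of A's for-loop, on state (word_sent, word_indexes, punct_sent, last_punct)
def pvAStep (m : Int) (st : List String × List Int × List String × String)
    (iw : Int × String) : List String × List Int × List String × String :=
  let ws := st.1; let idxs := st.2.1; let ps := st.2.2.1; let lp := st.2.2.2
  let i := iw.1; let w := iw.2
  if PySem.Str.isIn w pvPUNCT then
    if lp = "NONE" then (ws, idxs, ps, w)
    else if m > 0 ∧ PySem.Str.len lp < 2 * m - 1 then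
      if PySem.Str.endswith lp "." && w.toList.all (fun x => x == '.') then
        (ws, idxs, ps, lp ++ w)
      else
        (ws, idxs, ps, lp ++ " " ++ w)
    else (ws, idxs, ps, lp)
  else
    (ws ++ [w], idxs ++ [i], if ws.length > 0 then ps ++ [lp] else ps, "NONE")

def make_word_punct_sents (sent : List String) (max_punct_in_row : Int) :
    List String × List String × List Int :=
  let st := (PySem.List.enumerate sent).foldl (pvAStep max_punct_in_row) ([], [], [], "")
  (st.1, st.2.2.1 ++ [st.2.2.2], st.2.1)

-- ===== PORT B =====
-- _fold_punct's loop body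
def pvStepPunct (m : Int) (acc t : String) : String :=
  if acc = "NONE" then t
  else if m > 0 ∧ PySem.Str.len acc < 2 * m - 1 then
    if PySem.Str.endswith acc "." && t.toList.all (fun x => x == '.') then acc ++ t
    else acc ++ " " ++ t
  else acc

def pvFoldPunct (init : String) (toks : List String) (m : Int) : String :=
  toks.foldl (pvStepPunct m) init

-- groups[-1][2].append(word) on an immutable list: rebuild with the last punct-run extended
def pvAppendLast : List (String × Int × List String) → String → List (String × Int × List String)
  | [], _ => []
  | [g], w => [(g.1, g.2.1, g.2.2 ++ [w])]
  | g :: gs, w => g :: pvAppendLast gs w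

-- the body of B's grouping loop, on state (leading, groups)
def pvGroupStep (st : List String × List (String × Int × List String)) (iw : Int × String) :
    List String × List (String × Int × List String) :=
  let i := iw.1; let w := iw.2
  if PySem.Str.isIn w pvPUNCT then
    match st.2 with
    | [] => (st.1 ++ [w], st.2)
    | _ :: _ => (st.1, pvAppendLast st.2 w)
  else (st.1, st.2 ++ [(w, i, [])])

def make_word_punct_sents_alt (sent : List String) (max_punct_in_row : Int) :
    List String × List String × List Int :=
  let st := (PySem.List.enumerate sent).foldl pvGroupStep ([], [])
  let punct_sent :=
    if st.2.isEmpty then [pvFoldPunct "" st.1 max_punct_in_row]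
    else st.2.map (fun g => pvFoldPunct "NONE" g.2.2 max_punct_in_row)
  (st.2.map (fun g => g.1), punct_sent, st.2.map (fun g => g.2.1))

-- ===== PRECONDITION & SPEC =====
def Spec_make_word_punct_sents (sent : List String) (max_punct_in_row : Int) (out : List String × List String × List Int) : Prop := out = make_word_punct_sents_alt sent max_punct_in_row
instance (sent : List String) (max_punct_in_row : Int) (out : List String × List String × List Int) : Decidable (Spec_make_word_punct_sents sent max_punct_in_row out) := by unfold Spec_make_word_punct_sents; infer_instance

-- ===== CLAIM (what is proved, stated in full; the proofs are below) =====
def Claim_equal_make_word_punct_sents : Prop := ∀ (sent : List String) (max_punct_in_row : Int), Dom_make_word_punct_sents sent max_punct_in_row → Spec_make_word_punct_sents sent max_punct_in_row (make_word_punct_sents sent max_punct_in_row)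

-- ===== LEMMAS AND PROOFS =====

-- the A-state that corresponds to a B grouping state
def pvPack (m : Int) (st : List String × List (String × Int × List String)) :
    List String × List Int × List String × String :=
  match st.2.getLast? with
  | none => ([], [], [], pvFoldPunct "" st.1 m)
  | some g => (st.2.map (fun g => g.1), st.2.map (fun g => g.2.1),
               (st.2.dropLast).map (fun g => pvFoldPunct "NONE" g.2.2 m),
               pvFoldPunct "NONE" g.2.2 m)

theorem pvPack_nil (m : Int) (lead : List String) :
    pvPack m (lead, []) = ([], [], [], pvFoldPunct "" lead m) := rfl

theorem pvPack_concat (m : Int) (lead : List String)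
    (b : List (String × Int × List String)) (g : String × Int × List String) :
    pvPack m (lead, b ++ [g]) =
      ((b ++ [g]).map (fun g => g.1), (b ++ [g]).map (fun g => g.2.1),
       b.map (fun g => pvFoldPunct "NONE" g.2.2 m), pvFoldPunct "NONE" g.2.2 m) := by
  unfold pvPack
  rw [List.getLast?_concat]
  simp

theorem pvAStep_punct (m : Int) (ws : List String) (idxs : List Int) (ps : List String)
    (lp : String) (i : Int) (w : String) (h : PySem.Str.isIn w pvPUNCT = true) :
    pvAStep m (ws, idxs, ps, lp) (i, w) = (ws, idxs, ps, pvStepPunct m lp w) := by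
  simp only [pvAStep, pvStepPunct, h, if_true]
  split_ifs <;> rfl

theorem pvAStep_word (m : Int) (ws : List String) (idxs : List Int) (ps : List String)
    (lp : String) (i : Int) (w : String) (h : PySem.Str.isIn w pvPUNCT = false) :
    pvAStep m (ws, idxs, ps, lp) (i, w) =
      (ws ++ [w], idxs ++ [i], if ws.length > 0 then ps ++ [lp] else ps, "NONE") := by
  simp only [pvAStep, h, Bool.false_eq_true, if_false]

theorem pvFoldPunct_concat (init : String) (toks : List String) (t : String) (m : Int) :
    pvFoldPunct init (toks ++ [t]) m = pvStepPunct m (pvFoldPunct init toks m) t := by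
  simp [pvFoldPunct]

theorem pvAppendLast_concat (gs : List (String × Int × List String))
    (g : String × Int × List String) (w : String) :
    pvAppendLast (gs ++ [g]) w = gs ++ [(g.1, g.2.1, g.2.2 ++ [w])] := by
  induction gs with
  | nil => rfl
  | cons a tl ih =>
      cases tl with
      | nil => simp [pvAppendLast]
      | cons b tl' => simpa [pvAppendLast] using ih

theorem pvGroupStep_punct_nil (lead : List String) (i : Int) (w : String)
    (h : PySem.Str.isIn w pvPUNCT = true) :
    pvGroupStep (lead, []) (i, w) = (lead ++ [w], []) := by
  simp only [pvGroupStep, h, if_true]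

theorem pvGroupStep_punct_ne_nil (lead : List String)
    (gs : List (String × Int × List String)) (i : Int) (w : String)
    (h : PySem.Str.isIn w pvPUNCT = true) (hne : gs ≠ []) :
    pvGroupStep (lead, gs) (i, w) = (lead, pvAppendLast gs w) := by
  cases gs with
  | nil => exact absurd rfl hne
  | cons a tl => simp only [pvGroupStep, h, if_true]

theorem pvGroupStep_word (lead : List String) (gs : List (String × Int × List String))
    (i : Int) (w : String) (h : PySem.Str.isIn w pvPUNCT = false) :
    pvGroupStep (lead, gs) (i, w) = (lead, gs ++ [(w, i, [])]) := by
  simp only [pvGroupStep, h, Bool.false_eq_true, if_false]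

theorem pvPack_step (m : Int) (st : List String × List (String × Int × List String))
    (iw : Int × String) :
    pvAStep m (pvPack m st) iw = pvPack m (pvGroupStep st iw) := by
  obtain ⟨lead, gs⟩ := st
  obtain ⟨i, w⟩ := iw
  by_cases h : PySem.Str.isIn w pvPUNCT = true
  · rcases List.eq_nil_or_concat gs with hgs | ⟨b, g, hgs⟩ <;> subst hgs
    · rw [pvPack_nil, pvAStep_punct m _ _ _ _ _ _ h, pvGroupStep_punct_nil _ _ _ h,
        pvPack_nil, pvFoldPunct_concat]
    · simp only [List.concat_eq_append]
      rw [pvPack_concat, pvAStep_punct m _ _ _ _ _ _ h,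
        pvGroupStep_punct_ne_nil _ _ _ _ h (by simp), pvAppendLast_concat, pvPack_concat,
        pvFoldPunct_concat]
      simp
  · have h' : PySem.Str.isIn w pvPUNCT = false := by
      revert h; cases PySem.Str.isIn w pvPUNCT <;> simp
    rcases List.eq_nil_or_concat gs with hgs | ⟨b, g, hgs⟩ <;> subst hgs
    · rw [pvPack_nil, pvAStep_word m _ _ _ _ _ _ h', pvGroupStep_word _ _ _ _ h',
        pvPack_concat]
      simp [pvFoldPunct]
    · simp only [List.concat_eq_append]
      rw [pvPack_concat, pvAStep_word m _ _ _ _ _ _ h', pvGroupStep_word _ _ _ _ h',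
        pvPack_concat]
      simp [pvFoldPunct]

theorem pvPack_foldl (m : Int) (l : List (Int × String))
    (st : List String × List (String × Int × List String)) :
    l.foldl (pvAStep m) (pvPack m st) = pvPack m (l.foldl pvGroupStep st) := by
  induction l generalizing st with
  | nil => rfl
  | cons x xs ih => rw [List.foldl_cons, List.foldl_cons, pvPack_step, ih]

-- ===== VERDICT (by name: the statement is the Claim_ definition above) =====
theorem make_word_punct_sents_spec : Claim_equal_make_word_punct_sents := by
  intro sent m _
  show make_word_punct_sents sent m = make_word_punct_sents_alt sent m
  unfold make_word_punct_sents make_word_punct_sents_alt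
  have h0 : (([], [], [], "") : List String × List Int × List String × String)
      = pvPack m ([], []) := rfl
  rw [h0, pvPack_foldl]
  generalize (PySem.List.enumerate sent).foldl pvGroupStep ([], []) = st
  obtain ⟨lead, gs⟩ := st
  rcases List.eq_nil_or_concat gs with hgs | ⟨b, g, hgs⟩ <;> subst hgs
  · rw [pvPack_nil]
    simp
  · simp only [List.concat_eq_append]
    rw [pvPack_concat]
    simp
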